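-- pv_equiv track=rewrite | github.com/stonedseeker/leetcode | cp.py | minimum_relay_time
-- ===== SOURCE A (Python) =====
-- from collections import defaultdict
-- import heapq
--
-- def minimum_relay_time(n: int, edges: list[tuple[int, int, int]], source: int) -> int:
--     """
--     Calculates the minimum time Vybhv needs to collect data from all servers
--     and return to the source. Returns -1 if all servers cannot be reached.
--
--     :param n: Total number of servers.
--     :param edges: List of tuples representing relay paths between servers and their times.
--     :param source: The starting server for Vybhv.
--     :return: The minimum time required to collect data and return to the source, or -1 if unreachable.
--     """
--     # Input validation
--     if not isinstance(n, int) or n < 2: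
--         raise ValueError("Invalid input: Invalid number of servers.")
--     if not isinstance(edges, list) or any(
--         not isinstance(edge, tuple) or len(edge) != 3 or
--         not all(isinstance(x, int) for x in edge[:2]) or
--         not isinstance(edge[2], int) or edge[2] < 0 or
--         not (1 <= edge[0] <= n) or not (1 <= edge[1] <= n)
--         for edge in edges):
--         raise ValueError("Invalid input: Invalid edge data.")
--     if not isinstance(source, int) or not (1 <= source <= n):
--         raise ValueError("Invalid input: Invalid source server.")
--
--     # Graph representation
--     graph = defaultdict(list)
--     for u, v, time in edges:
--         graph[u].append((v, time))
--         graph[v].append((u, time))  # bidirectional graph since return is allowed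
--
--     # Function to perform Dijkstra's algorithm
--     def dijkstra(start):
--         min_heap = [(0, start)]  # (time, node)
--         dist = {i: float('inf') for i in range(1, n+1)}
--         dist[start] = 0
--
--         while min_heap:
--             curr_time, node = heapq.heappop(min_heap)
--
--             if curr_time > dist[node]:
--                 continue
--
--             for neighbor, time in graph[node]:
--                 new_time = curr_time + time
--                 if new_time < dist[neighbor]:
--                     dist[neighbor] = new_time
--                     heapq.heappush(min_heap, (new_time, neighbor))
--
--         return dist
--
--     # 1. Get shortest path from source to all servers
--     dist_from_source = dijkstra(source)
--
--     # 2. Get shortest path from all servers back to source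
--     dist_to_source = dijkstra(source)
--
--     # Ensure all servers are reachable
--     if any(dist_from_source[i] == float('inf') for i in range(1, n+1)):
--         return -1
--
--     # Calculate total relay time (there and back)
--     total_time = 0
--     for i in range(1, n+1):
--         total_time += dist_from_source[i] + dist_to_source[i]
--
--     return total_time
-- ===== SOURCE B (Python) =====
-- def minimum_relay_time(n: int, edges: list[tuple[int, int, int]], source: int) -> int:
--     """Bellman-Ford re-implementation: same validation, relax every edge (both
--     directions) for n-1 rounds, then return -1 if some server is unreachable,
--     else 2 * sum of distances (the two identical Dijkstra passes of the
--     original just double each distance)."""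
--     # Input validation (kept identical to the original)
--     if not isinstance(n, int) or n < 2:
--         raise ValueError("Invalid input: Invalid number of servers.")
--     if not isinstance(edges, list) or any(
--         not isinstance(edge, tuple) or len(edge) != 3 or
--         not all(isinstance(x, int) for x in edge[:2]) or
--         not isinstance(edge[2], int) or edge[2] < 0 or
--         not (1 <= edge[0] <= n) or not (1 <= edge[1] <= n)
--         for edge in edges):
--         raise ValueError("Invalid input: Invalid edge data.")
--     if not isinstance(source, int) or not (1 <= source <= n):
--         raise ValueError("Invalid input: Invalid source server.")
--
--     INF = float('inf')
--     dist = {i: INF for i in range(1, n + 1)}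
--     dist[source] = 0
--
--     for _ in range(n - 1):
--         for u, v, w in edges:
--             if dist[u] + w < dist[v]:
--                 dist[v] = dist[u] + w
--             if dist[v] + w < dist[u]:
--                 dist[u] = dist[v] + w
--
--     if any(dist[i] == INF for i in range(1, n + 1)):
--         return -1
--     return 2 * sum(dist[i] for i in range(1, n + 1))
-- ===== Notes on version B (the rewrite author's own statement) =====
-- stated objective: alternative
-- what changed: Replaced the heap-based Dijkstra (run twice and summed) with a single Bellman-Ford pass that relaxes every edge in both directions for n-1 rounds and returns 2*sum of the distances; validation is kept verbatim.
import Mathlib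
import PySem

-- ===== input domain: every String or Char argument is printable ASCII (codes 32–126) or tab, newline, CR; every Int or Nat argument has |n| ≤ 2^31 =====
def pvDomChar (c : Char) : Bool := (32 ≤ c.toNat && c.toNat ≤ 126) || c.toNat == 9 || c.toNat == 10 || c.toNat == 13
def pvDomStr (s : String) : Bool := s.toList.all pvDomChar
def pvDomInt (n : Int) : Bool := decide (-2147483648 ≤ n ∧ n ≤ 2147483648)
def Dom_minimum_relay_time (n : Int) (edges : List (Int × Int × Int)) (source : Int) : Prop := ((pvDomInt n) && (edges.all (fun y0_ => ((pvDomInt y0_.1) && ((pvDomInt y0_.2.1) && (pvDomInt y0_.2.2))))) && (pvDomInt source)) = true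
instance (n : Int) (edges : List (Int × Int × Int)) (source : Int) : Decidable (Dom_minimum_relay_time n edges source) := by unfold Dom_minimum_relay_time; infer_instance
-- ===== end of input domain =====

-- B replaces the two identical heap-based Dijkstra passes by a single Bellman-Ford
-- relaxation (n-1 rounds over all edges, both directions) returning 2 * the distance
-- sum; an alternative algorithm of similar cost, not claimed faster.

-- ===== PORT A =====

-- validation condition of A's 'any(...)' edge check (type-level parts are vacuous under the
-- Int typing; the value-level parts are transcribed exactly)
def pvOkEdgesA (n : Int) (edges : List (Int × Int × Int)) : Bool :=
  edges.all (fun e => decide (0 ≤ e.2.2) && decide (1 ≤ e.1) && decide (e.1 ≤ n)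
    && decide (1 ≤ e.2.1) && decide (e.2.1 ≤ n))

-- A's defaultdict adjacency after the build loop: per edge (u,v,w) in order, (v,w) is
-- appended to graph[u] and then (u,w) to graph[v]; graph[x] is exactly this flatMap
def pvAdjA (edges : List (Int × Int × Int)) (x : Int) : List (Int × Int) :=
  edges.flatMap (fun e =>
    (if e.1 = x then [(e.2.1, e.2.2)] else []) ++ (if e.2.1 = x then [(e.1, e.2.2)] else []))

-- heapq is modelled by its contract: heappop returns the smallest (time, node) tuple
-- (Python tuple order, exact) and removes that occurrence; heappush appends.
def pvPopMin : List (Int × Int) → Option ((Int × Int) × List (Int × Int))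
  | [] => none
  | x :: xs =>
    match pvPopMin xs with
    | none => some (x, [])
    | some (m, r) => if x.1 < m.1 ∨ (x.1 = m.1 ∧ x.2 ≤ m.2) then some (x, xs) else some (m, x :: r)

-- the inner 'for neighbor, time in graph[node]' relaxation loop of dijkstra;
-- dist is the dict {1..n → value} as a function, none = float('inf')
def pvRelaxA (t : Int) (st : (Int → Option Int) × List (Int × Int)) (nbrs : List (Int × Int)) :
    (Int → Option Int) × List (Int × Int) :=
  nbrs.foldl (fun s q =>
    if (match s.1 q.1 with | none => true | some dv => decide (t + q.2 < dv)) then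
      ((fun x => if x = q.1 then some (t + q.2) else s.1 x), s.2 ++ [(t + q.2, q.1)])
    else s) st

-- Python's 'curr_time > dist[node]' (False when dist[node] is inf)
def pvStaleA (d : Int → Option Int) (t u : Int) : Bool :=
  match d u with | some du => decide (du < t) | none => false

-- lemmas the port itself needs (termination / hypothesis threading)
theorem pvPopMin_eq_none : ∀ {h : List (Int × Int)}, pvPopMin h = none → h = [] := by
  intro h
  cases h with
  | nil => intro _; rfl
  | cons x xs =>
    intro hc
    exfalso
    rcases hmr : pvPopMin xs with _ | ⟨m, r⟩ <;> simp [pvPopMin, hmr] at hc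
    split at hc <;> simp at hc

theorem pvPopMin_perm : ∀ {h : List (Int × Int)} {p : Int × Int} {r : List (Int × Int)},
    pvPopMin h = some (p, r) → h.Perm (p :: r) := by
  intro h
  induction h with
  | nil => intro p r hc; simp [pvPopMin] at hc
  | cons x xs ih =>
    intro p r hc
    rcases hmr : pvPopMin xs with _ | ⟨m, r'⟩
    · have hxs := pvPopMin_eq_none hmr
      subst hxs
      simp [pvPopMin] at hc
      obtain ⟨rfl, rfl⟩ := hc
      exact List.Perm.refl _
    · simp only [pvPopMin, hmr] at hc
      split at hc
      · simp only [Option.some.injEq, Prod.mk.injEq] at hc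
        obtain ⟨rfl, rfl⟩ := hc
        exact List.Perm.refl _
      · simp only [Option.some.injEq, Prod.mk.injEq] at hc
        obtain ⟨rfl, rfl⟩ := hc
        exact ((ih hmr).cons x).trans (List.Perm.swap _ _ _)

theorem pvRelaxA_cons (t : Int) (st : (Int → Option Int) × List (Int × Int)) (q : Int × Int)
    (nbrs : List (Int × Int)) :
    pvRelaxA t st (q :: nbrs) = pvRelaxA t
      (if (match st.1 q.1 with | none => true | some dv => decide (t + q.2 < dv)) then
        ((fun x => if x = q.1 then some (t + q.2) else st.1 x), st.2 ++ [(t + q.2, q.1)])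
      else st) nbrs := rfl

theorem pvRelaxA_cons' (t : Int) (d : Int → Option Int) (h' : List (Int × Int))
    (q : Int × Int) (nbrs : List (Int × Int)) :
    pvRelaxA t (d, h') (q :: nbrs) = pvRelaxA t
      (if (match d q.1 with | none => true | some dv => decide (t + q.2 < dv)) then
        ((fun x => if x = q.1 then some (t + q.2) else d x), h' ++ [(t + q.2, q.1)])
      else (d, h')) nbrs := rfl

theorem pvRelaxA_nil (t : Int) (st : (Int → Option Int) × List (Int × Int)) :
    pvRelaxA t st [] = st := rfl

theorem pvRelaxA_heap_nonneg {t : Int} {nbrs : List (Int × Int)}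
    (hw : ∀ q ∈ nbrs, 0 ≤ q.2) (ht : 0 ≤ t) :
    ∀ (d : Int → Option Int) (h' : List (Int × Int)), (∀ p ∈ h', 0 ≤ p.1) →
      ∀ p ∈ (pvRelaxA t (d, h') nbrs).2, 0 ≤ p.1 := by
  induction nbrs with
  | nil => intro d h' hh p hp; exact hh p hp
  | cons q rest ih =>
    intro d h' hh
    rw [pvRelaxA_cons]
    have hw' : ∀ p ∈ rest, 0 ≤ p.2 := fun p hp => hw p (List.mem_cons_of_mem _ hp)
    have hq2 : 0 ≤ q.2 := hw q List.mem_cons_self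
    by_cases hcc : (match (d, h').1 q.1 with | none => true | some dv => decide (t + q.2 < dv)) = true
    · rw [if_pos hcc]
      refine ih hw' _ _ ?_
      intro p hp
      rcases List.mem_append.mp hp with hp | hp
      · exact hh p hp
      · simp only [List.mem_singleton] at hp
        subst hp
        simp only
        omega
    · rw [if_neg hcc]
      exact ih hw' _ _ hh

def pvNodes (n : Int) : List Int := PySem.List.pyRange 1 (n+1)

def pvNC (n : Int) (d : Int → Option Int) : Nat :=
  ((pvNodes n).map (fun i => if (d i).isNone then 1 else 0)).sum

def pvSM (n : Int) (d : Int → Option Int) : Nat :=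
  ((pvNodes n).map (fun i => ((d i).getD 0).toNat)).sum

theorem pv_sum_update (f : Option Int → Nat) :
    ∀ (l : List Int), l.Nodup → ∀ v ∈ l, ∀ (d : Int → Option Int) (a : Option Int),
      (l.map (fun i => f (if i = v then a else d i))).sum + f (d v)
        = (l.map (fun i => f (d i))).sum + f a := by
  intro l
  induction l with
  | nil => intro _ v hv; simp at hv
  | cons i l ih =>
    intro hnd v hv d a
    rcases List.nodup_cons.mp hnd with ⟨hi, hndl⟩
    simp only [List.map_cons, List.sum_cons]
    rcases List.mem_cons.mp hv with rfl | hv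
    · have hmap : l.map (fun j => f (if j = v then a else d j)) = l.map (fun j => f (d j)) := by
        apply List.map_congr_left
        intro j hj
        have : j ≠ v := fun hjv => hi (hjv ▸ hj)
        simp [this]
      rw [hmap]
      simp
      omega
    · have hiv : i ≠ v := fun hiv => hi (hiv ▸ hv)
      rw [if_neg hiv]
      have := ih hndl v hv d a
      omega

theorem pvRelaxA_measure {n t : Int} {nbrs : List (Int × Int)}
    (hn : ∀ q ∈ nbrs, 1 ≤ q.1 ∧ q.1 ≤ n ∧ 0 ≤ q.2) (ht : 0 ≤ t) :
    ∀ (d : Int → Option Int) (h' : List (Int × Int)),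
      pvNC n (pvRelaxA t (d, h') nbrs).1 ≤ pvNC n d ∧
      (pvNC n (pvRelaxA t (d, h') nbrs).1 = pvNC n d →
        pvSM n (pvRelaxA t (d, h') nbrs).1 + (pvRelaxA t (d, h') nbrs).2.length
          ≤ pvSM n d + h'.length) ∧
      h'.length ≤ (pvRelaxA t (d, h') nbrs).2.length := by
  induction nbrs with
  | nil =>
    intro d h'
    rw [pvRelaxA_nil]
    exact ⟨le_refl _, fun _ => le_refl _, le_refl _⟩
  | cons q rest ih =>
    intro d h'
    have hn' : ∀ p ∈ rest, 1 ≤ p.1 ∧ p.1 ≤ n ∧ 0 ≤ p.2 :=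
      fun p hp => hn p (List.mem_cons_of_mem _ hp)
    obtain ⟨hq1, hq2, hq3⟩ := hn q List.mem_cons_self
    have hmemq : q.1 ∈ pvNodes n := by
      unfold pvNodes
      rw [PySem.List.mem_pyRange_one]
      omega
    have hnd : (pvNodes n).Nodup := PySem.List.nodup_pyRange_one 1 (n+1)
    rw [pvRelaxA_cons']
    rcases hd : d q.1 with _ | dv
    · rw [if_pos (by simp [hd])]
      have hNC : pvNC n (fun x => if x = q.1 then some (t + q.2) else d x)
          + (if (d q.1).isNone then 1 else 0) = pvNC n d + 0 := by
        simpa [pvNC] using pv_sum_update (fun o => if o.isNone then 1 else 0)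
          (pvNodes n) hnd q.1 hmemq d (some (t + q.2))
      have hSM : pvSM n (fun x => if x = q.1 then some (t + q.2) else d x)
          + ((d q.1).getD 0).toNat = pvSM n d + (t + q.2).toNat := by
        simpa [pvSM] using pv_sum_update (fun o => (o.getD 0).toNat)
          (pvNodes n) hnd q.1 hmemq d (some (t + q.2))
      rw [hd] at hNC hSM
      simp at hNC hSM
      obtain ⟨ihA, ihB, ihC⟩ := ih hn'
        (fun x => if x = q.1 then some (t + q.2) else d x) (h' ++ [(t + q.2, q.1)])
      have hlen : (h' ++ [(t + q.2, q.1)]).length = h'.length + 1 := by simp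
      refine ⟨by omega, fun hEq => by omega, by omega⟩
    · by_cases hlt : t + q.2 < dv
      · rw [if_pos (by simp [hd, hlt])]
        have hNC : pvNC n (fun x => if x = q.1 then some (t + q.2) else d x)
            + (if (d q.1).isNone then 1 else 0) = pvNC n d + 0 := by
          simpa [pvNC] using pv_sum_update (fun o => if o.isNone then 1 else 0)
            (pvNodes n) hnd q.1 hmemq d (some (t + q.2))
        have hSM : pvSM n (fun x => if x = q.1 then some (t + q.2) else d x)
            + ((d q.1).getD 0).toNat = pvSM n d + (t + q.2).toNat := by
          simpa [pvSM] using pv_sum_update (fun o => (o.getD 0).toNat)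
            (pvNodes n) hnd q.1 hmemq d (some (t + q.2))
        rw [hd] at hNC hSM
        simp at hNC hSM
        obtain ⟨ihA, ihB, ihC⟩ := ih hn'
          (fun x => if x = q.1 then some (t + q.2) else d x) (h' ++ [(t + q.2, q.1)])
        have hlen : (h' ++ [(t + q.2, q.1)]).length = h'.length + 1 := by simp
        refine ⟨by omega, fun hEq => by omega, by omega⟩
      · rw [if_neg (by simp [hd, hlt])]
        exact ih hn' d h'

theorem pvAdjA_range {n : Int} {edges : List (Int × Int × Int)} (hv : pvOkEdgesA n edges = true) :
    ∀ u q, q ∈ pvAdjA edges u → 1 ≤ q.1 ∧ q.1 ≤ n ∧ 0 ≤ q.2 := by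
  intro u q hq
  unfold pvAdjA at hq
  rw [List.mem_flatMap] at hq
  obtain ⟨e, he, hmem⟩ := hq
  have hok := (List.all_eq_true.mp hv) e he
  simp only [Bool.and_eq_true, decide_eq_true_eq] at hok
  rcases List.mem_append.mp hmem with hm | hm
  · by_cases h1 : e.1 = u
    · simp [h1] at hm
      subst hm
      exact ⟨hok.1.2, hok.2, hok.1.1.1.1⟩
    · simp [h1] at hm
  · by_cases h1 : e.2.1 = u
    · simp [h1] at hm
      subst hm
      exact ⟨hok.1.1.1.2, hok.1.1.2, hok.1.1.1.1⟩
    · simp [h1] at hm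

-- the dijkstra 'while min_heap' loop (dist only, as a function; heap as a list)
def pvLoopA (n : Int) (adj : Int → List (Int × Int))
    (hadj : ∀ u q, q ∈ adj u → 1 ≤ q.1 ∧ q.1 ≤ n ∧ 0 ≤ q.2)
    (h : List (Int × Int)) (d : Int → Option Int)
    (hh : ∀ p ∈ h, 0 ≤ p.1) : Int → Option Int :=
  match hp : pvPopMin h with
  | none => d
  | some (tu, r) =>
    if pvStaleA d tu.1 tu.2 then
      pvLoopA n adj hadj r d
        (fun p hpr => hh p ((pvPopMin_perm hp).mem_iff.mpr (List.mem_cons_of_mem _ hpr)))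
    else
      pvLoopA n adj hadj (pvRelaxA tu.1 (d, r) (adj tu.2)).2 (pvRelaxA tu.1 (d, r) (adj tu.2)).1
        (pvRelaxA_heap_nonneg (fun q hq => (hadj tu.2 q hq).2.2)
          (hh tu ((pvPopMin_perm hp).mem_iff.mpr (List.mem_cons_self)))
          d r (fun p hpr => hh p ((pvPopMin_perm hp).mem_iff.mpr (List.mem_cons_of_mem _ hpr))))
  termination_by (pvNC n d, pvSM n d, h.length)
  decreasing_by
  · have hlen : h.length = r.length + 1 := by
      simpa using (pvPopMin_perm hp).length_eq
    simp [Prod.lex_iff]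
    omega
  · have hlen : h.length = r.length + 1 := by
      simpa using (pvPopMin_perm hp).length_eq
    have hm := pvRelaxA_measure (n := n) (t := tu.1) (nbrs := adj tu.2)
      (fun q hq => hadj tu.2 q hq)
      (hh tu ((pvPopMin_perm hp).mem_iff.mpr (List.mem_cons_self))) d r
    simp [Prod.lex_iff]
    omega

theorem pvInitHeap_nonneg (source : Int) : ∀ p ∈ [((0 : Int), source)], 0 ≤ p.1 := by
  intro p hp
  simp only [List.mem_singleton] at hp
  subst hp
  exact le_refl 0

-- port of A: validation, adjacency, two identical dijkstra passes, check, sum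
def minimum_relay_time (n : Int) (edges : List (Int × Int × Int)) (source : Int) : Int :=
  if n < 2 then 0  -- Python: raise ValueError (excluded by Pre_)
  else if hv : pvOkEdgesA n edges = true then
    if 1 ≤ source ∧ source ≤ n then
      let d0 : Int → Option Int := fun i => if i = source then some 0 else none
      let d1 := pvLoopA n (pvAdjA edges)
        (pvAdjA_range hv) [(0, source)] d0 (pvInitHeap_nonneg source)
      let d2 := pvLoopA n (pvAdjA edges)
        (pvAdjA_range hv) [(0, source)] d0 (pvInitHeap_nonneg source)
      if (PySem.List.pyRange 1 (n+1)).any (fun i => (d1 i).isNone) then -1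
      else (PySem.List.pyRange 1 (n+1)).foldl
        (fun acc i => acc + ((d1 i).getD 0 + (d2 i).getD 0)) 0
    else 0  -- Python: raise ValueError (excluded by Pre_)
  else 0  -- Python: raise ValueError (excluded by Pre_)

-- ===== PORT B =====

def minimum_relay_time_alt (n : Int) (edges : List (Int × Int × Int)) (source : Int) : Int :=
  if n < 2 then 0  -- Python: raise ValueError (excluded by Pre_)
  else if pvOkEdgesA n edges = true then  -- same validation block, kept verbatim in B
    if 1 ≤ source ∧ source ≤ n then
      let d0 : Int → Option Int := fun i => if i = source then some 0 else none
      -- n-1 Bellman-Ford rounds; each round relaxes every edge in both directions,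
      -- in order (the relax step is written inline; none = float('inf'))
      let dB := (PySem.List.pyRange 0 (n-1)).foldl
        (fun d _ => edges.foldl
          (fun d e =>
            (fun d1 : Int → Option Int =>
              if (match d1 e.2.1, d1 e.1 with
                  | none, _ => false
                  | some _, none => true
                  | some da, some db => decide (da + e.2.2 < db)) then
                fun x => if x = e.1 then some ((d1 e.2.1).getD 0 + e.2.2) else d1 x
              else d1)
            (if (match d e.1, d e.2.1 with
                | none, _ => false
                | some _, none => true
                | some da, some db => decide (da + e.2.2 < db)) then
              fun x => if x = e.2.1 then some ((d e.1).getD 0 + e.2.2) else d x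
            else d))
          d)
        d0
      if (PySem.List.pyRange 1 (n+1)).any (fun i => (dB i).isNone) then -1
      else 2 * (PySem.List.pyRange 1 (n+1)).foldl (fun acc i => acc + (dB i).getD 0) 0
    else 0  -- Python: raise ValueError (excluded by Pre_)
  else 0  -- Python: raise ValueError (excluded by Pre_)

-- ===== PRECONDITION & SPEC =====

-- Pre_ is exactly the set of inputs A's validation accepts (everywhere else the Python
-- raises ValueError): n ≥ 2, every edge inside 1..n with nonnegative weight, source in 1..n.
def Pre_minimum_relay_time (n : Int) (edges : List (Int × Int × Int)) (source : Int) : Prop :=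
  2 ≤ n ∧ (∀ e ∈ edges, 1 ≤ e.1 ∧ e.1 ≤ n ∧ 1 ≤ e.2.1 ∧ e.2.1 ≤ n ∧ 0 ≤ e.2.2)
    ∧ 1 ≤ source ∧ source ≤ n

instance (n : Int) (edges : List (Int × Int × Int)) (source : Int) :
    Decidable (Pre_minimum_relay_time n edges source) := by
  unfold Pre_minimum_relay_time; infer_instance

def pvWitness_minimum_relay_time : Int × (List (Int × Int × Int)) × Int := (2, [(1, 2, 3)], 1)

def Spec_minimum_relay_time (n : Int) (edges : List (Int × Int × Int)) (source : Int) (out : Int) : Prop :=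
  out = minimum_relay_time_alt n edges source

instance (n : Int) (edges : List (Int × Int × Int)) (source : Int) (out : Int) :
    Decidable (Spec_minimum_relay_time n edges source out) := by
  unfold Spec_minimum_relay_time; infer_instance

-- ===== CLAIM (what is proved, stated in full; the proofs are below) =====
def Claim_equal_minimum_relay_time : Prop :=
  ∀ (n : Int) (edges : List (Int × Int × Int)) (source : Int),
    Dom_minimum_relay_time n edges source → Pre_minimum_relay_time n edges source →
      Spec_minimum_relay_time n edges source (minimum_relay_time n edges source)

-- ===== LEMMAS AND PROOFS =====

-- order on dict values, none = float('inf') at the top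
def pvOLe : Option Int → Option Int → Prop
  | _, none => True
  | none, some _ => False
  | some x, some y => x ≤ y

def pvAddO (o : Option Int) (w : Int) : Option Int := o.map (· + w)

theorem pvOLe_refl (o : Option Int) : pvOLe o o := by cases o <;> simp [pvOLe]

theorem pvOLe_trans {a b c : Option Int} : pvOLe a b → pvOLe b c → pvOLe a c := by
  cases a <;> cases b <;> cases c <;> simp [pvOLe] <;> omega

theorem pvOLe_none (o : Option Int) : pvOLe o none := by cases o <;> simp [pvOLe]

theorem pvOLe_none_left {o : Option Int} (h : pvOLe none o) : o = none := by
  cases o <;> simp [pvOLe] at h ⊢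

theorem pvOLe_some_iff {a : Option Int} {y : Int} :
    pvOLe a (some y) ↔ ∃ x, a = some x ∧ x ≤ y := by
  cases a <;> simp [pvOLe]

theorem pvAddO_mono {a b : Option Int} {w : Int} (h : pvOLe a b) :
    pvOLe (pvAddO a w) (pvAddO b w) := by
  cases a <;> cases b <;> simp [pvOLe, pvAddO] at h ⊢ <;> omega

theorem pvOLe_addO_some {a : Option Int} {c w : Int} (h : pvOLe a (some c)) :
    pvOLe (pvAddO a w) (some (c + w)) := by
  cases a <;> simp [pvOLe, pvAddO] at h ⊢ <;> omega

-- the undirected edge relation of the graph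
def pvEdgeU (E : List (Int × Int × Int)) (u v w : Int) : Prop :=
  (u, v, w) ∈ E ∨ (v, u, w) ∈ E

theorem pvAdjA_mem_iff {E : List (Int × Int × Int)} {u : Int} {q : Int × Int} :
    q ∈ pvAdjA E u ↔ pvEdgeU E u q.1 q.2 := by
  unfold pvAdjA pvEdgeU
  rw [List.mem_flatMap]
  constructor
  · rintro ⟨⟨a, b, c⟩, he, hm⟩
    rcases List.mem_append.mp hm with hm | hm
    · by_cases h1 : a = u
      · simp [h1] at hm
        subst hm
        subst h1
        exact Or.inl he
      · simp [h1] at hm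
    · by_cases h1 : b = u
      · simp [h1] at hm
        subst hm
        subst h1
        exact Or.inr he
      · simp [h1] at hm
  · rintro (he | he)
    · exact ⟨(u, q.1, q.2), he, by simp⟩
    · refine ⟨(q.1, u, q.2), he, ?_⟩
      refine List.mem_append.mpr (Or.inr ?_)
      simp

-- walks from the source (vertex list tracked for the simple-path bound)
inductive pvWalk (E : List (Int × Int × Int)) (s : Int) : Int → Int → List Int → Prop
  | nil : pvWalk E s s 0 [s]
  | cons {u v w c : Int} {vs : List Int} :
      pvWalk E s u c vs → pvEdgeU E u v w → pvWalk E s v (c + w) (vs ++ [v])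

theorem pvEdgeU_w_nonneg {E : List (Int × Int × Int)} {u v w : Int}
    (hW : ∀ e ∈ E, 0 ≤ e.2.2) (h : pvEdgeU E u v w) : 0 ≤ w := by
  rcases h with h | h
  · exact hW _ h
  · exact hW _ h

theorem pvWalk_prefix {E : List (Int × Int × Int)} {s : Int} (hW : ∀ e ∈ E, 0 ≤ e.2.2) :
    ∀ {v c vs}, pvWalk E s v c vs →
      ∀ x ∈ vs, ∃ c' vs', pvWalk E s x c' vs' ∧ c' ≤ c ∧ vs' <+: vs := by
  intro v c vs h
  induction h with
  | nil =>
    intro x hx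
    simp only [List.mem_singleton] at hx
    subst hx
    exact ⟨0, _, pvWalk.nil, le_refl 0, List.prefix_refl _⟩
  | @cons u v' w c' vs' hwk he ih =>
    intro x hx
    rcases List.mem_append.mp hx with hx | hx
    · obtain ⟨c'', vs'', h1, h2, h3⟩ := ih x hx
      have hw0 : 0 ≤ w := pvEdgeU_w_nonneg hW he
      exact ⟨c'', vs'', h1, by omega, h3.trans (List.prefix_append _ _)⟩
    · simp only [List.mem_singleton] at hx
      subst hx
      exact ⟨c' + w, vs' ++ [x], pvWalk.cons hwk he, le_refl _, List.prefix_refl _⟩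

theorem pvWalk_range {E : List (Int × Int × Int)} {s n : Int}
    (hE : ∀ e ∈ E, 1 ≤ e.1 ∧ e.1 ≤ n ∧ 1 ≤ e.2.1 ∧ e.2.1 ≤ n)
    (hs1 : 1 ≤ s) (hs2 : s ≤ n) :
    ∀ {v c vs}, pvWalk E s v c vs → ∀ x ∈ vs, 1 ≤ x ∧ x ≤ n := by
  intro v c vs h
  induction h with
  | nil =>
    intro x hx
    simp only [List.mem_singleton] at hx
    subst hx
    exact ⟨hs1, hs2⟩
  | @cons u v' w c' vs' hwk he ih =>
    intro x hx
    rcases List.mem_append.mp hx with hx | hx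
    · exact ih x hx
    · simp only [List.mem_singleton] at hx
      subst hx
      rcases he with he | he
      · have := hE _ he
        exact ⟨this.2.2.1, this.2.2.2⟩
      · have := hE _ he
        exact ⟨this.1, this.2.1⟩

theorem pvWalk_len {n : Int} (hn : 0 ≤ n) {vs : List Int} (hnd : vs.Nodup)
    (hr : ∀ x ∈ vs, 1 ≤ x ∧ x ≤ n) : (vs.length : Int) ≤ n := by
  have hsub : vs.toFinset ⊆ Finset.Icc (1 : Int) n := by
    intro x hx
    have := hr x (List.mem_toFinset.mp hx)
    simp [Finset.mem_Icc, this.1, this.2]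
  have hcard := Finset.card_le_card hsub
  rw [List.toFinset_card_of_nodup hnd, Int.card_Icc] at hcard
  omega

-- characterizations of the inner relaxation loop of A
theorem pvRelaxA_heap_sub {t : Int} {nbrs : List (Int × Int)} :
    ∀ (d : Int → Option Int) (h' : List (Int × Int)) (p : Int × Int),
      p ∈ h' → p ∈ (pvRelaxA t (d, h') nbrs).2 := by
  induction nbrs with
  | nil => intro d h' p hp; exact hp
  | cons q rest ih =>
    intro d h' p hp
    rw [pvRelaxA_cons']
    by_cases hcc : (match d q.1 with | none => true | some dv => decide (t + q.2 < dv)) = true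
    · rw [if_pos hcc]
      exact ih _ _ p (List.mem_append.mpr (Or.inl hp))
    · rw [if_neg hcc]
      exact ih _ _ p hp

theorem pvRelaxA_mono {t : Int} {nbrs : List (Int × Int)} :
    ∀ (d : Int → Option Int) (h' : List (Int × Int)) (x : Int),
      pvOLe ((pvRelaxA t (d, h') nbrs).1 x) (d x) := by
  induction nbrs with
  | nil => intro d h' x; exact pvOLe_refl _
  | cons q rest ih =>
    intro d h' x
    rw [pvRelaxA_cons']
    rcases hd : d q.1 with _ | dv
    · rw [if_pos (by simp [hd])]
      refine pvOLe_trans (ih _ _ x) ?_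
      by_cases hx : x = q.1
      · subst hx; rw [hd]; exact pvOLe_none _
      · simp only [if_neg hx]; exact pvOLe_refl _
    · by_cases hlt : t + q.2 < dv
      · rw [if_pos (by simp [hd, hlt])]
        refine pvOLe_trans (ih _ _ x) ?_
        by_cases hx : x = q.1
        · subst hx; rw [hd]; simp only [if_pos rfl]; simp [pvOLe]; omega
        · simp only [if_neg hx]; exact pvOLe_refl _
      · rw [if_neg (by simp [hd, hlt])]
        exact ih _ _ x

theorem pvRelaxA_heap_vals {t : Int} {nbrs : List (Int × Int)} :
    ∀ (d : Int → Option Int) (h' : List (Int × Int)) (p : Int × Int),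
      p ∈ (pvRelaxA t (d, h') nbrs).2 →
      p ∈ h' ∨ ∃ du, (pvRelaxA t (d, h') nbrs).1 p.2 = some du ∧ du ≤ p.1 := by
  induction nbrs with
  | nil => intro d h' p hp; exact Or.inl hp
  | cons q rest ih =>
    intro d h' p hp
    rw [pvRelaxA_cons'] at hp ⊢
    by_cases hcc : (match d q.1 with | none => true | some dv => decide (t + q.2 < dv)) = true
    · rw [if_pos hcc] at hp ⊢
      rcases ih _ _ p hp with hmem | hv
      · rcases List.mem_append.mp hmem with hmem | hmem
        · exact Or.inl hmem
        · simp only [List.mem_singleton] at hmem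
          subst hmem
          right
          have hm := pvRelaxA_mono (t := t) (nbrs := rest)
            (fun x => if x = q.1 then some (t + q.2) else d x) (h' ++ [(t + q.2, q.1)]) q.1
          simp only [if_pos rfl] at hm
          rcases pvOLe_some_iff.mp hm with ⟨du, hdu, hle⟩
          exact ⟨du, hdu, hle⟩
      · exact Or.inr hv
    · rw [if_neg hcc] at hp ⊢
      exact ih _ _ p hp

theorem pvRelaxA_post {t : Int} {nbrs : List (Int × Int)} :
    ∀ (d : Int → Option Int) (h' : List (Int × Int)) (q : Int × Int), q ∈ nbrs →
      pvOLe ((pvRelaxA t (d, h') nbrs).1 q.1) (some (t + q.2)) := by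
  induction nbrs with
  | nil => intro d h' q hq; simp at hq
  | cons q0 rest ih =>
    intro d h' q hq
    rw [pvRelaxA_cons']
    rcases List.mem_cons.mp hq with rfl | hq
    · rcases hd : d q.1 with _ | dv
      · rw [if_pos (by simp [hd])]
        have hm := pvRelaxA_mono (t := t) (nbrs := rest)
          (fun x => if x = q.1 then some (t + q.2) else d x) (h' ++ [(t + q.2, q.1)]) q.1
        simp only [if_pos rfl] at hm
        exact hm
      · by_cases hlt : t + q.2 < dv
        · rw [if_pos (by simp [hd, hlt])]
          have hm := pvRelaxA_mono (t := t) (nbrs := rest)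
            (fun x => if x = q.1 then some (t + q.2) else d x) (h' ++ [(t + q.2, q.1)]) q.1
          simp only [if_pos rfl] at hm
          exact hm
        · rw [if_neg (by simp [hd, hlt])]
          refine pvOLe_trans (pvRelaxA_mono _ _ _) ?_
          rw [hd]
          simp [pvOLe]
          omega
    · by_cases hcc : (match d q0.1 with | none => true | some dv => decide (t + q0.2 < dv)) = true
      · rw [if_pos hcc]; exact ih _ _ q hq
      · rw [if_neg hcc]; exact ih _ _ q hq

theorem pvRelaxA_fix {t u : Int} {nbrs : List (Int × Int)}
    (hw : ∀ q ∈ nbrs, 0 ≤ q.2) :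
    ∀ (d : Int → Option Int) (h' : List (Int × Int)), d u = some t →
      (pvRelaxA t (d, h') nbrs).1 u = some t := by
  induction nbrs with
  | nil => intro d h' hdu; exact hdu
  | cons q rest ih =>
    intro d h' hdu
    have hw' : ∀ q ∈ rest, 0 ≤ q.2 := fun q hq => hw q (List.mem_cons_of_mem _ hq)
    have hq2 : 0 ≤ q.2 := hw q List.mem_cons_self
    rw [pvRelaxA_cons']
    by_cases hqu : q.1 = u
    · subst hqu
      rw [hdu]
      rw [if_neg (by simp; omega)]
      exact ih hw' _ _ hdu
    · by_cases hcc : (match d q.1 with | none => true | some dv => decide (t + q.2 < dv)) = true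
      · rw [if_pos hcc]
        refine ih hw' _ _ ?_
        simp only [if_neg (fun h => hqu (h ▸ rfl) : ¬ u = q.1)]
        exact hdu
      · rw [if_neg hcc]
        exact ih hw' _ _ hdu

theorem pvRelaxA_wit {t : Int} {nbrs : List (Int × Int)} :
    ∀ (d : Int → Option Int) (h' : List (Int × Int)) (x : Int),
      (pvRelaxA t (d, h') nbrs).1 x = d x ∨
      ∃ p ∈ (pvRelaxA t (d, h') nbrs).2, p.2 = x ∧ (pvRelaxA t (d, h') nbrs).1 x = some p.1 := by
  induction nbrs with
  | nil => intro d h' x; exact Or.inl rfl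
  | cons q rest ih =>
    intro d h' x
    rw [pvRelaxA_cons']
    by_cases hcc : (match d q.1 with | none => true | some dv => decide (t + q.2 < dv)) = true
    · rw [if_pos hcc]
      rcases ih (fun y => if y = q.1 then some (t + q.2) else d y) (h' ++ [(t + q.2, q.1)]) x
        with heq | ⟨p, hp, hpx, hval⟩
      · by_cases hx : x = q.1
        · subst hx
          right
          refine ⟨(t + q.2, q.1), ?_, rfl, ?_⟩
          · exact pvRelaxA_heap_sub _ _ _ (List.mem_append.mpr (Or.inr (List.mem_singleton.mpr rfl)))
          · rw [heq]; simp
        · left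
          rw [heq]
          simp [hx]
      · exact Or.inr ⟨p, hp, hpx, hval⟩
    · rw [if_neg hcc]
      exact ih _ _ x

theorem pvRelaxA_char {t : Int} {nbrs : List (Int × Int)} :
    ∀ (d : Int → Option Int) (h' : List (Int × Int)) (x : Int),
      (pvRelaxA t (d, h') nbrs).1 x = d x ∨
      ∃ q ∈ nbrs, q.1 = x ∧ (pvRelaxA t (d, h') nbrs).1 x = some (t + q.2) := by
  induction nbrs with
  | nil => intro d h' x; exact Or.inl rfl
  | cons q rest ih =>
    intro d h' x
    rw [pvRelaxA_cons']
    by_cases hcc : (match d q.1 with | none => true | some dv => decide (t + q.2 < dv)) = true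
    · rw [if_pos hcc]
      rcases ih (fun y => if y = q.1 then some (t + q.2) else d y) (h' ++ [(t + q.2, q.1)]) x
        with heq | ⟨q', hq', hqx, hval⟩
      · by_cases hx : x = q.1
        · subst hx
          right
          refine ⟨q, List.mem_cons_self, rfl, ?_⟩
          rw [heq]; simp
        · left
          rw [heq]
          simp [hx]
      · exact Or.inr ⟨q', List.mem_cons_of_mem _ hq', hqx, hval⟩
    · rw [if_neg hcc]
      rcases ih d h' x with heq | ⟨q', hq', hqx, hval⟩
      · exact Or.inl heq
      · exact Or.inr ⟨q', List.mem_cons_of_mem _ hq', hqx, hval⟩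


-- invariant of A's dijkstra loop and its final guarantees
def pvInvA (E : List (Int × Int × Int)) (s : Int)
    (d : Int → Option Int) (h : List (Int × Int)) : Prop :=
  (∀ p ∈ h, ∃ du, d p.2 = some du ∧ du ≤ p.1) ∧
  (∀ u q, q ∈ pvAdjA E u →
    pvOLe (d q.1) (pvAddO (d u) q.2) ∨ ∃ p ∈ h, p.2 = u ∧ d u = some p.1) ∧
  (∀ v x, d v = some x → ∃ c vs, pvWalk E s v c vs ∧ vs.Nodup ∧ c ≤ x) ∧
  d s = some 0 ∧
  (∀ v x, d v = some x → 0 ≤ x)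

def pvFinalA (E : List (Int × Int × Int)) (s : Int) (D : Int → Option Int) : Prop :=
  (∀ u q, q ∈ pvAdjA E u → pvOLe (D q.1) (pvAddO (D u) q.2)) ∧
  D s = some 0 ∧
  (∀ v x, D v = some x → ∃ c vs, pvWalk E s v c vs ∧ vs.Nodup ∧ c ≤ x) ∧
  (∀ v x, D v = some x → 0 ≤ x)

theorem pvLoopA_eq_none {n : Int} {adj : Int → List (Int × Int)}
    {hadj : ∀ u q, q ∈ adj u → 1 ≤ q.1 ∧ q.1 ≤ n ∧ 0 ≤ q.2}
    {h : List (Int × Int)} {d : Int → Option Int} {hh : ∀ p ∈ h, 0 ≤ p.1}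
    (hp : pvPopMin h = none) : pvLoopA n adj hadj h d hh = d := by
  rw [pvLoopA.eq_def]
  split
  · rfl
  · exfalso; simp_all

theorem pvLoopA_eq_stale {n : Int} {adj : Int → List (Int × Int)}
    {hadj : ∀ u q, q ∈ adj u → 1 ≤ q.1 ∧ q.1 ≤ n ∧ 0 ≤ q.2}
    {h : List (Int × Int)} {d : Int → Option Int} {hh : ∀ p ∈ h, 0 ≤ p.1}
    {tu : Int × Int} {r : List (Int × Int)}
    (hp : pvPopMin h = some (tu, r)) (hs : pvStaleA d tu.1 tu.2 = true)
    (hh' : ∀ p ∈ r, 0 ≤ p.1) :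
    pvLoopA n adj hadj h d hh = pvLoopA n adj hadj r d hh' := by
  rw [pvLoopA.eq_def]
  split
  · exfalso; simp_all
  · rename_i tu' r' hp2
    rw [hp] at hp2
    simp only [Option.some.injEq, Prod.mk.injEq] at hp2
    obtain ⟨h2, h3⟩ := hp2
    subst h2; subst h3
    rw [if_pos hs]

theorem pvLoopA_eq_go {n : Int} {adj : Int → List (Int × Int)}
    {hadj : ∀ u q, q ∈ adj u → 1 ≤ q.1 ∧ q.1 ≤ n ∧ 0 ≤ q.2}
    {h : List (Int × Int)} {d : Int → Option Int} {hh : ∀ p ∈ h, 0 ≤ p.1}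
    {tu : Int × Int} {r : List (Int × Int)}
    (hp : pvPopMin h = some (tu, r)) (hs : ¬ pvStaleA d tu.1 tu.2 = true)
    (hh' : ∀ p ∈ (pvRelaxA tu.1 (d, r) (adj tu.2)).2, 0 ≤ p.1) :
    pvLoopA n adj hadj h d hh
      = pvLoopA n adj hadj (pvRelaxA tu.1 (d, r) (adj tu.2)).2
          (pvRelaxA tu.1 (d, r) (adj tu.2)).1 hh' := by
  rw [pvLoopA.eq_def]
  split
  · exfalso; simp_all
  · rename_i tu' r' hp2
    rw [hp] at hp2
    simp only [Option.some.injEq, Prod.mk.injEq] at hp2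
    obtain ⟨h2, h3⟩ := hp2
    subst h2; subst h3
    rw [if_neg hs]

theorem pvLoopA_final {n : Int} {E : List (Int × Int × Int)} {s : Int}
    (hW : ∀ e ∈ E, 0 ≤ e.2.2)
    (hadj : ∀ u q, q ∈ pvAdjA E u → 1 ≤ q.1 ∧ q.1 ≤ n ∧ 0 ≤ q.2) :
    ∀ (h : List (Int × Int)) (d : Int → Option Int) (hh : ∀ p ∈ h, 0 ≤ p.1),
      pvInvA E s d h → pvFinalA E s (pvLoopA n (pvAdjA E) hadj h d hh) := by
  intro h0 d0 hh0
  induction h0, d0, hh0 using pvLoopA.induct n (pvAdjA E) hadj with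
  | case1 h d hh hp =>
    intro hInv
    obtain ⟨hIa, hIb, hIc, hId, hIe⟩ := hInv
    have hnil := pvPopMin_eq_none hp
    subst hnil
    rw [pvLoopA_eq_none hp]
    refine ⟨?_, hId, hIc, hIe⟩
    intro u q hq
    rcases hIb u q hq with hle | ⟨p, hpm, _⟩
    · exact hle
    · simp at hpm
  | case2 h d hh tu r hp hstale ih =>
    intro hInv
    obtain ⟨hIa, hIb, hIc, hId, hIe⟩ := hInv
    have hperm := pvPopMin_perm hp
    rw [pvLoopA_eq_stale hp hstale
      (fun p hpr => hh p (hperm.mem_iff.mpr (List.mem_cons_of_mem _ hpr)))]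
    refine ih ⟨?_, ?_, hIc, hId, hIe⟩
    · exact fun p hpr => hIa p (hperm.mem_iff.mpr (List.mem_cons_of_mem _ hpr))
    · intro u q hq
      rcases hIb u q hq with hle | ⟨p, hpm, hpu, hval⟩
      · exact Or.inl hle
      · rcases List.mem_cons.mp (hperm.mem_iff.mp hpm) with rfl | hpr
        · exfalso
          rw [← hpu] at hval
          simp only [pvStaleA, hval, decide_eq_true_eq] at hstale
          omega
        · exact Or.inr ⟨p, hpr, hpu, hval⟩
  | case3 h d hh tu r hp hstale ih =>
    intro hInv
    obtain ⟨hIa, hIb, hIc, hId, hIe⟩ := hInv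
    have hperm := pvPopMin_perm hp
    have htu_mem : tu ∈ h := hperm.mem_iff.mpr List.mem_cons_self
    have ht0 : 0 ≤ tu.1 := hh tu htu_mem
    obtain ⟨du, hdu, hdule⟩ := hIa tu htu_mem
    have hdut : d tu.2 = some tu.1 := by
      simp only [pvStaleA, hdu, decide_eq_true_eq] at hstale
      have : du = tu.1 := by omega
      rw [hdu, this]
    have hwn : ∀ q ∈ pvAdjA E tu.2, 0 ≤ q.2 := fun q hq => (hadj tu.2 q hq).2.2
    rw [pvLoopA_eq_go hp hstale
      (pvRelaxA_heap_nonneg (fun q hq => (hadj tu.2 q hq).2.2) ht0 d r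
        (fun p hpr => hh p (hperm.mem_iff.mpr (List.mem_cons_of_mem _ hpr))))]
    refine ih ?_
    refine ⟨?_, ?_, ?_, ?_, ?_⟩
    · -- Ia for relaxed state
      intro p hps
      rcases pvRelaxA_heap_vals d r p hps with hpr | hv
      · obtain ⟨dp, hdp, hdple⟩ := hIa p (hperm.mem_iff.mpr (List.mem_cons_of_mem _ hpr))
        have hm := pvRelaxA_mono (t := tu.1) (nbrs := pvAdjA E tu.2) d r p.2
        rw [hdp] at hm
        obtain ⟨dp', hdp', hle'⟩ := pvOLe_some_iff.mp hm
        exact ⟨dp', hdp', le_trans hle' hdple⟩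
      · exact hv
    · -- Ib for relaxed state
      intro u' q' hq'
      rcases hIb u' q' hq' with hle | ⟨p, hpm, hpu, hval⟩
      · rcases pvRelaxA_wit (t := tu.1) (nbrs := pvAdjA E tu.2) d r u' with heq | ⟨p, hp2, hpu, hval⟩
        · left
          refine pvOLe_trans (pvRelaxA_mono d r q'.1) ?_
          rw [heq]
          exact hle
        · exact Or.inr ⟨p, hp2, hpu, hval⟩
      · rcases List.mem_cons.mp (hperm.mem_iff.mp hpm) with heq | hpr
        · -- the witness was the popped entry: relaxation re-established the edge
          left
          subst heq
          subst hpu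
          have hfix := pvRelaxA_fix hwn d r hdut
          rw [hfix]
          have hpost := pvRelaxA_post (t := p.1) d r q' hq'
          simpa [pvAddO] using hpost
        · rcases pvRelaxA_wit (t := tu.1) (nbrs := pvAdjA E tu.2) d r u' with heq | ⟨p', hp2, hpu', hval'⟩
          · exact Or.inr ⟨p, pvRelaxA_heap_sub d r p hpr, hpu, heq ▸ hval⟩
          · exact Or.inr ⟨p', hp2, hpu', hval'⟩
    · -- Ic for relaxed state
      intro v x hvx
      rcases pvRelaxA_char (t := tu.1) (nbrs := pvAdjA E tu.2) d r v with heq | ⟨q, hq, hqv, hval⟩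
      · exact hIc v x (heq ▸ hvx)
      · have hx : x = tu.1 + q.2 := by
          rw [hvx] at hval
          exact Option.some.inj hval
        obtain ⟨c, vs, hwk, hnd, hc⟩ := hIc tu.2 tu.1 hdut
        have he : pvEdgeU E tu.2 q.1 q.2 := pvAdjA_mem_iff.mp hq
        have hq2 : 0 ≤ q.2 := hwn q hq
        subst hqv
        by_cases hvm : q.1 ∈ vs
        · obtain ⟨c', vs', h1, h2, h3⟩ := pvWalk_prefix hW hwk q.1 hvm
          exact ⟨c', vs', h1, List.Nodup.sublist h3.sublist hnd, by omega⟩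
        · refine ⟨c + q.2, vs ++ [q.1], pvWalk.cons hwk he, ?_, by omega⟩
          rw [List.nodup_append]
          refine ⟨hnd, List.nodup_singleton _, ?_⟩
          intro a ha b hb
          have hb' : b = q.1 := List.mem_singleton.mp hb
          subst hb'
          exact fun hab => hvm (hab ▸ ha)
    · -- d source stays 0
      rcases pvRelaxA_char (t := tu.1) (nbrs := pvAdjA E tu.2) d r s with heq | ⟨q, hq, hqv, hval⟩
      · rw [heq]; exact hId
      · have hq2 := hwn q hq
        have hm := pvRelaxA_mono (t := tu.1) (nbrs := pvAdjA E tu.2) d r s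
        rw [hId] at hm
        obtain ⟨y, hy, hyle⟩ := pvOLe_some_iff.mp hm
        rw [hval] at hy
        have := Option.some.inj hy
        rw [hval]
        have : tu.1 + q.2 = 0 := by omega
        rw [this]
    · -- nonnegativity
      intro v x hvx
      rcases pvRelaxA_char (t := tu.1) (nbrs := pvAdjA E tu.2) d r v with heq | ⟨q, hq, hqv, hval⟩
      · exact hIe v x (heq ▸ hvx)
      · rw [hvx] at hval
        have := hwn q hq
        have := Option.some.inj hval
        omega

-- B-side: the inline relax step of the port, named for the proofs
def pvRelaxB (d : Int → Option Int) (a b w : Int) : Int → Option Int :=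
  if (match d a, d b with
      | none, _ => false
      | some _, none => true
      | some da, some db => decide (da + w < db)) then
    fun x => if x = b then some ((d a).getD 0 + w) else d x
  else d

def pvRoundB (edges : List (Int × Int × Int)) (d : Int → Option Int) : Int → Option Int :=
  edges.foldl (fun d e => pvRelaxB (pvRelaxB d e.1 e.2.1 e.2.2) e.2.1 e.1 e.2.2) d

-- the port's inline Bellman-Ford body, re-expressed through pvRoundB (definitional)
theorem pvAltBody_eq (n : Int) (edges : List (Int × Int × Int)) (source : Int) :
    minimum_relay_time_alt n edges source =
      (if n < 2 then 0
      else if pvOkEdgesA n edges = true then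
        if 1 ≤ source ∧ source ≤ n then
          let d0 : Int → Option Int := fun i => if i = source then some 0 else none
          let dB := (PySem.List.pyRange 0 (n-1)).foldl (fun d _ => pvRoundB edges d) d0
          if (PySem.List.pyRange 1 (n+1)).any (fun i => (dB i).isNone) then -1
          else 2 * (PySem.List.pyRange 1 (n+1)).foldl (fun acc i => acc + (dB i).getD 0) 0
        else 0
      else 0) := rfl

-- B-side: properties of the Bellman-Ford relaxation
theorem pvRelaxB_ne {d : Int → Option Int} {a b w x : Int} (hx : x ≠ b) :
    pvRelaxB d a b w x = d x := by
  unfold pvRelaxB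
  by_cases hc : (match d a, d b with
      | none, _ => false
      | some _, none => true
      | some da, some db => decide (da + w < db)) = true
  · rw [if_pos hc]
    simp [hx]
  · rw [if_neg hc]

theorem pvRelaxB_mono (d : Int → Option Int) (a b w x : Int) :
    pvOLe (pvRelaxB d a b w x) (d x) := by
  by_cases hx : x = b
  · subst hx
    rcases hda : d a with _ | da
    · unfold pvRelaxB
      rw [hda]
      exact pvOLe_refl _
    · rcases hdb : d x with _ | db
      · exact pvOLe_none _
      · unfold pvRelaxB
        rw [hda, hdb]
        by_cases hlt : da + w < db
        · rw [if_pos (by simpa using hlt)]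
          simp only [if_pos rfl, hda, hdb]
          simp [pvOLe]
          omega
        · rw [if_neg (by simpa using hlt)]
          rw [hdb]
          exact pvOLe_refl _

  · rw [pvRelaxB_ne hx]
    exact pvOLe_refl _

theorem pvRelaxB_post (d : Int → Option Int) (a b w : Int) :
    pvOLe (pvRelaxB d a b w b) (pvAddO (d a) w) := by
  rcases hda : d a with _ | da
  · simp [pvAddO, hda, pvOLe_none]
  · rcases hdb : d b with _ | db
    · unfold pvRelaxB
      rw [hda, hdb]
      simp only [if_pos rfl]
      simp [pvAddO, hda, pvOLe]
    · unfold pvRelaxB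
      rw [hda, hdb]
      by_cases hlt : da + w < db
      · rw [if_pos (by simpa using hlt)]
        simp [pvAddO, hda, pvOLe]
      · rw [if_neg (by simpa using hlt)]
        rw [hdb]
        simp [pvAddO, pvOLe]
        omega

theorem pvRelaxB_upper {dA d : Int → Option Int} {a b w : Int}
    (hb : pvOLe (dA b) (pvAddO (dA a) w)) (hd : ∀ x, pvOLe (dA x) (d x)) :
    ∀ x, pvOLe (dA x) (pvRelaxB d a b w x) := by
  intro x
  by_cases hx : x = b
  · subst hx
    rcases hda : d a with _ | da
    · unfold pvRelaxB
      rw [hda]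
      exact hd x
    · unfold pvRelaxB
      rw [hda]
      rcases hdb : d x with _ | db
      · simp only [if_pos rfl]
        refine pvOLe_trans hb ?_
        have := hd a
        rw [hda] at this
        have h2 := pvOLe_addO_some (w := w) this
        simpa [hda] using h2
      · by_cases hlt : da + w < db
        · rw [if_pos (by simpa using hlt)]
          simp only [if_pos rfl]
          refine pvOLe_trans hb ?_
          have := hd a
          rw [hda] at this
          have h2 := pvOLe_addO_some (w := w) this
          simpa [hda] using h2
        · rw [if_neg (by simpa using hlt)]
          exact hd x
  · rw [pvRelaxB_ne hx]
    exact hd x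

-- a single edge step of the round
theorem pvFoldB_mono (E : List (Int × Int × Int)) :
    ∀ (l : List (Int × Int × Int)) (d : Int → Option Int) (x : Int),
      pvOLe ((l.foldl (fun d e => pvRelaxB (pvRelaxB d e.1 e.2.1 e.2.2) e.2.1 e.1 e.2.2) d) x)
        (d x) := by
  intro l
  induction l with
  | nil => intro d x; exact pvOLe_refl _
  | cons e rest ih =>
    intro d x
    rw [List.foldl_cons]
    refine pvOLe_trans (ih _ x) ?_
    exact pvOLe_trans (pvRelaxB_mono _ _ _ _ _) (pvRelaxB_mono _ _ _ _ _)

theorem pvFoldB_post :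
    ∀ (l : List (Int × Int × Int)) (d : Int → Option Int) (e : Int × Int × Int), e ∈ l →
      pvOLe ((l.foldl (fun d e => pvRelaxB (pvRelaxB d e.1 e.2.1 e.2.2) e.2.1 e.1 e.2.2) d) e.2.1)
          (pvAddO (d e.1) e.2.2) ∧
      pvOLe ((l.foldl (fun d e => pvRelaxB (pvRelaxB d e.1 e.2.1 e.2.2) e.2.1 e.1 e.2.2) d) e.1)
          (pvAddO (d e.2.1) e.2.2) := by
  intro l
  induction l with
  | nil => intro d e he; simp at he
  | cons e0 rest ih =>
    intro d e he
    rw [List.foldl_cons]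
    rcases List.mem_cons.mp he with rfl | he
    · constructor
      · refine pvOLe_trans (pvFoldB_mono rest rest _ _) ?_
        refine pvOLe_trans (pvRelaxB_mono _ _ _ _ _) (pvRelaxB_post _ _ _ _)
      · refine pvOLe_trans (pvFoldB_mono rest rest _ _) ?_
        refine pvOLe_trans (pvRelaxB_post _ _ _ _) ?_
        exact pvAddO_mono (pvRelaxB_mono _ _ _ _ _)
    · obtain ⟨h1, h2⟩ := ih _ e he
      have hmono : ∀ x, pvOLe ((pvRelaxB (pvRelaxB d e0.1 e0.2.1 e0.2.2) e0.2.1 e0.1 e0.2.2) x) (d x) :=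
        fun x => pvOLe_trans (pvRelaxB_mono _ _ _ _ _) (pvRelaxB_mono _ _ _ _ _)
      exact ⟨pvOLe_trans h1 (pvAddO_mono (hmono _)), pvOLe_trans h2 (pvAddO_mono (hmono _))⟩

theorem pvRoundB_mono (E : List (Int × Int × Int)) (d : Int → Option Int) (x : Int) :
    pvOLe (pvRoundB E d x) (d x) := pvFoldB_mono E E d x

theorem pvRoundB_postU {E : List (Int × Int × Int)} {d : Int → Option Int} {a b w : Int}
    (he : pvEdgeU E a b w) : pvOLe (pvRoundB E d b) (pvAddO (d a) w) := by
  rcases he with he | he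
  · exact (pvFoldB_post E d (a, b, w) he).1
  · exact (pvFoldB_post E d (b, a, w) he).2

theorem pvRoundB_upper {E : List (Int × Int × Int)} {dA : Int → Option Int}
    (hst : ∀ a b w, pvEdgeU E a b w → pvOLe (dA b) (pvAddO (dA a) w)) :
    ∀ (l : List (Int × Int × Int)), (∀ e ∈ l, e ∈ E) →
      ∀ (d : Int → Option Int), (∀ x, pvOLe (dA x) (d x)) →
      ∀ x, pvOLe (dA x)
        ((l.foldl (fun d e => pvRelaxB (pvRelaxB d e.1 e.2.1 e.2.2) e.2.1 e.1 e.2.2) d) x) := by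
  intro l
  induction l with
  | nil => intro _ d hd x; exact hd x
  | cons e0 rest ih =>
    intro hsub d hd x
    rw [List.foldl_cons]
    refine ih (fun e he => hsub e (List.mem_cons_of_mem _ he)) _ ?_ x
    have he0 : e0 ∈ E := hsub e0 List.mem_cons_self
    have h1 : ∀ y, pvOLe (dA y) (pvRelaxB d e0.1 e0.2.1 e0.2.2 y) :=
      pvRelaxB_upper (hst e0.1 e0.2.1 e0.2.2 (Or.inl he0)) hd
    exact pvRelaxB_upper (hst e0.2.1 e0.1 e0.2.2 (Or.inr he0)) h1

theorem pvFoldl_const {α β : Type} (f : β → β) :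
    ∀ (l : List α) (d : β), l.foldl (fun x _ => f x) d = f^[l.length] d := by
  intro l
  induction l with
  | nil => intro d; rfl
  | cons a rest ih =>
    intro d
    rw [List.foldl_cons, ih, List.length_cons]
    exact (Function.iterate_succ_apply f rest.length d).symm

theorem pvIter_mono {f : (Int → Option Int) → (Int → Option Int)}
    (hf : ∀ d x, pvOLe (f d x) (d x)) :
    ∀ (k : Nat) (d : Int → Option Int) (x : Int), pvOLe (f^[k] d x) (d x) := by
  intro k
  induction k with
  | zero => intro d x; exact pvOLe_refl _
  | succ k ih =>
    intro d x
    rw [Function.iterate_succ_apply']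
    exact pvOLe_trans (hf _ x) (ih d x)

theorem pvIter_le {f : (Int → Option Int) → (Int → Option Int)}
    (hf : ∀ d x, pvOLe (f d x) (d x)) {j k : Nat} (h : j ≤ k) :
    ∀ (d : Int → Option Int) (x : Int), pvOLe (f^[k] d x) (f^[j] d x) := by
  intro d x
  obtain ⟨m, rfl⟩ := Nat.exists_eq_add_of_le h
  rw [Nat.add_comm, Function.iterate_add_apply]
  exact pvIter_mono hf m _ x

theorem pvWalk_pos {E : List (Int × Int × Int)} {s v c : Int} {vs : List Int}
    (h : pvWalk E s v c vs) : 1 ≤ vs.length := by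
  cases h <;> simp

theorem pvWalkB_bound {E : List (Int × Int × Int)} {s : Int} :
    ∀ {v c : Int} {vs : List Int}, pvWalk E s v c vs →
      pvOLe ((pvRoundB E)^[vs.length - 1] (fun i => if i = s then some (0:Int) else none) v)
        (some c) := by
  intro v c vs h
  induction h with
  | nil =>
    simp only [List.length_singleton, Nat.sub_self, Function.iterate_zero, id_eq, if_pos rfl]
    simp [pvOLe]
  | @cons u v' w c' vs' hwk he ih =>
    have hpos := pvWalk_pos hwk
    have hlen : (vs' ++ [v']).length - 1 = (vs'.length - 1) + 1 := by
      simp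
      omega
    rw [hlen, Function.iterate_succ_apply']
    refine pvOLe_trans (pvRoundB_postU he) ?_
    exact pvOLe_addO_some ih

theorem pvStableU {E : List (Int × Int × Int)} {s : Int} {D : Int → Option Int}
    (hfin : pvFinalA E s D) :
    ∀ a b w, pvEdgeU E a b w → pvOLe (D b) (pvAddO (D a) w) :=
  fun a b w he => hfin.1 a (b, w) (pvAdjA_mem_iff.mpr he)

theorem pvUpperIter {E : List (Int × Int × Int)} {s : Int} {dA : Int → Option Int}
    (hst : ∀ a b w, pvEdgeU E a b w → pvOLe (dA b) (pvAddO (dA a) w))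
    (hs0 : dA s = some 0) :
    ∀ (k : Nat) (x : Int),
      pvOLe (dA x) ((pvRoundB E)^[k] (fun i => if i = s then some (0:Int) else none) x) := by
  intro k
  induction k with
  | zero =>
    intro x
    simp only [Function.iterate_zero, id_eq]
    by_cases hx : x = s
    · subst hx
      rw [hs0, if_pos rfl]
      simp [pvOLe]
    · rw [if_neg hx]
      exact pvOLe_none _
  | succ k ih =>
    intro x
    rw [Function.iterate_succ_apply']
    exact pvRoundB_upper hst E (fun e he => he) _ ih x

-- ===== VERDICT (by name: the statement is the Claim_ definition above) =====
theorem minimum_relay_time_spec : Claim_equal_minimum_relay_time := by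
  unfold Claim_equal_minimum_relay_time
  intro n E src _hDom hPre
  unfold Spec_minimum_relay_time
  obtain ⟨hn2, hE, hs1, hs2⟩ := hPre
  have hokA : pvOkEdgesA n E = true := by
    unfold pvOkEdgesA
    rw [List.all_eq_true]
    intro e he
    obtain ⟨h1, h2, h3, h4, h5⟩ := hE e he
    simp only [Bool.and_eq_true, decide_eq_true_eq]
    exact ⟨⟨⟨⟨h5, h1⟩, h2⟩, h3⟩, h4⟩
  have hnlt : ¬ n < 2 := by omega
  have hsrc : 1 ≤ src ∧ src ≤ n := ⟨hs1, hs2⟩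
  have hW : ∀ e ∈ E, 0 ≤ e.2.2 := fun e he => (hE e he).2.2.2.2
  have hER : ∀ e ∈ E, 1 ≤ e.1 ∧ e.1 ≤ n ∧ 1 ≤ e.2.1 ∧ e.2.1 ≤ n :=
    fun e he => ⟨(hE e he).1, (hE e he).2.1, (hE e he).2.2.1, (hE e he).2.2.2.1⟩
  unfold minimum_relay_time
  rw [pvAltBody_eq]
  rw [if_neg hnlt, dif_pos hokA, if_pos hsrc, if_neg hnlt, if_pos hokA, if_pos hsrc]
  simp only
  have hInv0 : pvInvA E src (fun i => if i = src then some (0:Int) else none) [(0, src)] := by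
    refine ⟨?_, ?_, ?_, ?_, ?_⟩
    · intro p hp
      simp only [List.mem_singleton] at hp
      subst hp
      exact ⟨0, by simp, le_refl 0⟩
    · intro u q hq
      by_cases hu : u = src
      · subst hu
        exact Or.inr ⟨(0, u), List.mem_singleton.mpr rfl, rfl, by simp⟩
      · left
        have hnone : (fun i => if i = src then some (0:Int) else none) u = none := by simp [hu]
        rw [hnone]
        simp only [pvAddO, Option.map_none]
        exact pvOLe_none _
    · intro v x hvx
      by_cases hv : v = src
      · subst hv
        simp at hvx
        exact ⟨0, [v], pvWalk.nil, List.nodup_singleton _, by omega⟩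
      · simp [hv] at hvx
    · simp
    · intro v x hvx
      by_cases hv : v = src
      · subst hv
        simp at hvx
        omega
      · simp [hv] at hvx
  have hfin : pvFinalA E src
      (pvLoopA n (pvAdjA E) (pvAdjA_range hokA) [(0, src)]
        (fun i => if i = src then some (0:Int) else none) (pvInitHeap_nonneg src)) :=
    pvLoopA_final hW (pvAdjA_range hokA) _ _ _ hInv0
  have hiter : (PySem.List.pyRange 0 (n-1)).foldl (fun d _ => pvRoundB E d)
      (fun i => if i = src then some (0:Int) else none)
      = (pvRoundB E)^[(n-1).toNat] (fun i => if i = src then some (0:Int) else none) := by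
    rw [pvFoldl_const (pvRoundB E)]
    congr 1
    simp
  have heq : ∀ x, (PySem.List.pyRange 0 (n-1)).foldl (fun d _ => pvRoundB E d)
      (fun i => if i = src then some (0:Int) else none) x
      = pvLoopA n (pvAdjA E) (pvAdjA_range hokA) [(0, src)]
        (fun i => if i = src then some (0:Int) else none) (pvInitHeap_nonneg src) x := by
    intro x
    have hupper := pvUpperIter (pvStableU hfin) hfin.2.1 (n-1).toNat x
    rw [← hiter] at hupper
    rcases hDAx : pvLoopA n (pvAdjA E) (pvAdjA_range hokA) [(0, src)]
        (fun i => if i = src then some (0:Int) else none) (pvInitHeap_nonneg src) x with _ | t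
    · rw [hDAx] at hupper
      exact pvOLe_none_left hupper
    · obtain ⟨c, vs, hwk, hnd, hc⟩ := hfin.2.2.1 x t hDAx
      have hrange := pvWalk_range hER hs1 hs2 hwk
      have hlenle : (vs.length : Int) ≤ n := pvWalk_len (by omega) hnd hrange
      have hkle : vs.length - 1 ≤ (n-1).toNat := by omega
      have hbound := pvWalkB_bound hwk
      have hle2 := pvIter_le (fun d x => pvRoundB_mono E d x) hkle
        (fun i => if i = src then some (0:Int) else none) x
      have hlow : pvOLe ((PySem.List.pyRange 0 (n-1)).foldl (fun d _ => pvRoundB E d)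
          (fun i => if i = src then some (0:Int) else none) x) (some c) := by
        rw [hiter]
        exact pvOLe_trans hle2 hbound
      rw [hDAx] at hupper
      rcases hFx : (PySem.List.pyRange 0 (n-1)).foldl (fun d _ => pvRoundB E d)
          (fun i => if i = src then some (0:Int) else none) x with _ | y
      · rw [hFx] at hlow
        exact absurd hlow (by simp [pvOLe])
      · rw [hFx] at hupper hlow
        have h1 : t ≤ y := by simpa [pvOLe] using hupper
        have h2 : y ≤ c := by simpa [pvOLe] using hlow
        have hyt : y = t := by omega
        rw [hyt]
  have hany : ((PySem.List.pyRange 1 (n+1)).any fun i =>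
        ((PySem.List.pyRange 0 (n-1)).foldl (fun d _ => pvRoundB E d)
          (fun i => if i = src then some (0:Int) else none) i).isNone)
      = ((PySem.List.pyRange 1 (n+1)).any fun i =>
        (pvLoopA n (pvAdjA E) (pvAdjA_range hokA) [(0, src)]
          (fun i => if i = src then some (0:Int) else none) (pvInitHeap_nonneg src) i).isNone) :=
    List.any_congr rfl (fun i => by rw [heq i])
  rw [hany]
  by_cases hcnd : ((PySem.List.pyRange 1 (n+1)).any fun i =>
      (pvLoopA n (pvAdjA E) (pvAdjA_range hokA) [(0, src)]
        (fun i => if i = src then some (0:Int) else none) (pvInitHeap_nonneg src) i).isNone) = true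
  · rw [if_pos hcnd, if_pos hcnd]
  · rw [if_neg hcnd, if_neg hcnd]
    have hmap : (PySem.List.pyRange 1 (n+1)).map (fun i =>
          (((PySem.List.pyRange 0 (n-1)).foldl (fun d _ => pvRoundB E d)
            (fun i => if i = src then some (0:Int) else none)) i).getD 0)
        = (PySem.List.pyRange 1 (n+1)).map (fun i =>
          ((pvLoopA n (pvAdjA E) (pvAdjA_range hokA) [(0, src)]
            (fun i => if i = src then some (0:Int) else none) (pvInitHeap_nonneg src)) i).getD 0) :=
      List.map_congr_left (fun i _ => by rw [heq i])
    rw [PySem.List.foldl_add, PySem.List.foldl_add, hmap, PySem.List.sum_map_add_int]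
    ring
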